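-- pv_equiv track=rewrite | github.com/conorbradley7/pythonProjects | First Year/Functions.py | grades_sem2
-- ===== SOURCE A (Python) =====
-- def grades_sem2(n):
--     grade_dict = {'A': [x for x in range(85,101)], 'B': [x for x in range(70,85)],
--                   'C':[x for x in range(55,70)], 'D':[x for x in range(40,55)],
--                   'E':[x for x in range(25,40)], 'F': [x for x in range(0,25)]}
--     try:
--         for letter, range_grade in grade_dict.items():
--             if (str(n)).capitalize() == letter:
--                 return 'Range of possible scores: ' + str(range_grade[0]) + '-' + str(range_grade[-1])
--         for letter, range_grade in grade_dict.items():
--             if int(n) in range_grade: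
--                 return letter
--
--     except Exception as e:
--         return "You entered a character input outside the acceptable ranges which caused an error in the program."
--     return "You entered a number input outside the acceptable range"
-- ===== SOURCE B (Python) =====
-- def grades_sem2(n):
--     bounds = {'A': (85, 100), 'B': (70, 84), 'C': (55, 69),
--               'D': (40, 54), 'E': (25, 39), 'F': (0, 24)}
--     key = str(n).capitalize()
--     if key in bounds:
--         lo, hi = bounds[key]
--         return 'Range of possible scores: ' + str(lo) + '-' + str(hi)
--     try:
--         m = int(n)
--     except Exception:
--         return "You entered a character input outside the acceptable ranges which caused an error in the program."
--     if m < 0 or m > 100: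
--         return "You entered a number input outside the acceptable range"
--     if m >= 85:
--         return 'A'
--     elif m >= 70:
--         return 'B'
--     elif m >= 55:
--         return 'C'
--     elif m >= 40:
--         return 'D'
--     elif m >= 25:
--         return 'E'
--     else:
--         return 'F'
-- ===== Notes on version B (the rewrite author's own statement) =====
-- stated objective: simpler
-- what changed: Replaces A's dict of enumerated integer range lists with two membership-scanning loops by a direct letter->(lo,hi) boundary dict lookup plus a threshold cascade on the parsed int (no range lists are built or scanned).
import Mathlib
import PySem

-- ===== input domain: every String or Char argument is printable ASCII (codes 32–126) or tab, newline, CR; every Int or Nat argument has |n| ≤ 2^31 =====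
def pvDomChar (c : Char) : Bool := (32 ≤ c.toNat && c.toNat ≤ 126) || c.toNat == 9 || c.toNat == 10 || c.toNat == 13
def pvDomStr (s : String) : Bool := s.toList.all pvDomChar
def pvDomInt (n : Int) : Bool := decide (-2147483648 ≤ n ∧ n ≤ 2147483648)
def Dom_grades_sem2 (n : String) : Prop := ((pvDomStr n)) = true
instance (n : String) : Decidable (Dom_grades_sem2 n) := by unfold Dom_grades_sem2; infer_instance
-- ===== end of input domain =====

-- B replaces A's per-letter enumerated integer lists and membership loops by a
-- letter→(lo,hi) boundary dict plus a threshold cascade (objective: simpler).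

-- shared helper: Python str.capitalize() (exact on the ASCII domain: first char
-- uppercased, the rest lowercased)
def pyCapitalize : List Char → List Char
  | [] => []
  | c :: t => PySem.Chars.upperChar c :: t.map PySem.Chars.lowerChar

-- ===== PORT A =====
-- A's grade_dict as an insertion-ordered association list, values the range lists
def gradeDictA : List (String × List Int) :=
  [("A", PySem.List.pyRange 85 101 1), ("B", PySem.List.pyRange 70 85 1),
   ("C", PySem.List.pyRange 55 70 1), ("D", PySem.List.pyRange 40 55 1),
   ("E", PySem.List.pyRange 25 40 1), ("F", PySem.List.pyRange 0 25 1)]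

-- first loop of A: 'if str(n).capitalize() == letter: return range string'
def loopLetters : List (String × List Int) → String → Option String
  | [], _ => none
  | (letter, rg) :: rest, key =>
      if key == letter then
        some ("Range of possible scores: " ++ PySem.Int.toStr (PySem.List.pyGetD rg 0 0)
              ++ "-" ++ PySem.Int.toStr (PySem.List.pyGetD rg (-1) 0))
      else loopLetters rest key

-- second loop of A: 'if int(n) in range_grade: return letter'
def loopRanges : List (String × List Int) → Int → Option String
  | [], _ => none
  | (letter, rg) :: rest, m =>
      if rg.contains m then some letter else loopRanges rest m

def grades_sem2 (n : String) : String :=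
  match loopLetters gradeDictA (String.ofList (pyCapitalize n.toList)) with
  | some r => r
  | none =>
    match PySem.Int.ofStr? n with   -- int(n); none = ValueError caught by the except
    | none => "You entered a character input outside the acceptable ranges which caused an error in the program."
    | some m =>
      match loopRanges gradeDictA m with
      | some letter => letter
      | none => "You entered a number input outside the acceptable range"

-- ===== PORT B =====
def boundsB : PySem.Dict String (Int × Int) :=
  PySem.Dict.ofList
    [("A", (85, 100)), ("B", (70, 84)), ("C", (55, 69)),
     ("D", (40, 54)), ("E", (25, 39)), ("F", (0, 24))]

def grades_sem2_alt (n : String) : String :=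
  match PySem.Dict.get? boundsB (String.ofList (pyCapitalize n.toList)) with
  | some (lo, hi) =>
      "Range of possible scores: " ++ PySem.Int.toStr lo ++ "-" ++ PySem.Int.toStr hi
  | none =>
    match PySem.Int.ofStr? n with
    | none => "You entered a character input outside the acceptable ranges which caused an error in the program."
    | some m =>
      if m < 0 || 100 < m then "You entered a number input outside the acceptable range"
      else if 85 ≤ m then "A"
      else if 70 ≤ m then "B"
      else if 55 ≤ m then "C"
      else if 40 ≤ m then "D"
      else if 25 ≤ m then "E"
      else "F"

-- ===== PRECONDITION & SPEC =====
def Spec_grades_sem2 (n : String) (out : String) : Prop := out = grades_sem2_alt n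
instance (n : String) (out : String) : Decidable (Spec_grades_sem2 n out) := by unfold Spec_grades_sem2; infer_instance

-- ===== CLAIM (what is proved, stated in full; the proofs are below) =====
def Claim_equal_grades_sem2 : Prop := ∀ (n : String), Dom_grades_sem2 n → Spec_grades_sem2 n (grades_sem2 n)

-- ===== LEMMAS AND PROOFS =====

-- the membership pass of A agrees with B's threshold cascade, for any int
theorem loopRanges_eq_cascade (m : Int) :
    (match loopRanges gradeDictA m with
      | some letter => letter
      | none => "You entered a number input outside the acceptable range") =
    (if m < 0 || 100 < m then "You entered a number input outside the acceptable range"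
      else if 85 ≤ m then "A"
      else if 70 ≤ m then "B"
      else if 55 ≤ m then "C"
      else if 40 ≤ m then "D"
      else if 25 ≤ m then "E"
      else "F") := by
  simp only [gradeDictA, loopRanges, List.contains_eq_mem, decide_eq_true_eq,
    Bool.or_eq_true, PySem.List.mem_pyRange_one]
  split_ifs <;> first | rfl | omega

-- ===== VERDICT (by name: the statement is the Claim_ definition above) =====
set_option maxRecDepth 8192 in
theorem grades_sem2_spec : Claim_equal_grades_sem2 := by
  intro n _
  unfold Spec_grades_sem2 grades_sem2 grades_sem2_alt
  have hb : boundsB = PySem.Dict.mk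
      [("A", (85, 100)), ("B", (70, 84)), ("C", (55, 69)),
       ("D", (40, 54)), ("E", (25, 39)), ("F", (0, 24))] := by decide
  rw [hb]
  simp only [loopLetters, gradeDictA, PySem.Dict.get?_mk_cons, beq_iff_eq,
    @eq_comm String "A", @eq_comm String "B", @eq_comm String "C",
    @eq_comm String "D", @eq_comm String "E", @eq_comm String "F"]
  by_cases hA : String.ofList (pyCapitalize n.toList) = "A"
  · simp only [if_pos hA]; decide
  simp only [if_neg hA]
  by_cases hB : String.ofList (pyCapitalize n.toList) = "B"
  · simp only [if_pos hB]; decide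
  simp only [if_neg hB]
  by_cases hC : String.ofList (pyCapitalize n.toList) = "C"
  · simp only [if_pos hC]; decide
  simp only [if_neg hC]
  by_cases hD : String.ofList (pyCapitalize n.toList) = "D"
  · simp only [if_pos hD]; decide
  simp only [if_neg hD]
  by_cases hE : String.ofList (pyCapitalize n.toList) = "E"
  · simp only [if_pos hE]; decide
  simp only [if_neg hE]
  by_cases hF : String.ofList (pyCapitalize n.toList) = "F"
  · simp only [if_pos hF]; decide
  simp only [if_neg hF]
  cases hm : PySem.Int.ofStr? n with
  | none => rfl
  | some m => exact loopRanges_eq_cascade m
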